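-- pv_equiv track=rewrite | github.com/3dformortals/data | python/codebox/codebox.py | upanddown
-- ===== SOURCE A (Python) =====
-- def upanddown(t):
--     x=""
--     toup=False
--     todn=False
--     x=list(t)
--     for i in range(len(t)):
--         if not toup and x[i]!=x[i].upper():
--             toup=True
--             x[i]=x[i].upper()
--         elif not todn and x[i]!=x[i].lower():
--             todn=True
--             x[i]=x[i].lower()
--     return "".join(x)
-- ===== SOURCE B (Python) =====
-- def upanddown(t):
--     up = next((i for i, c in enumerate(t) if c != c.upper()), None)
--     dn = next((i for i, c in enumerate(t) if c != c.lower() and i != up), None)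
--     return "".join(c.upper() if i == up else (c.lower() if i == dn else c)
--                    for i, c in enumerate(t))
-- ===== Notes on version B (the rewrite author's own statement) =====
-- stated objective: simpler
-- what changed: Replaces the single interleaved flag-mutating loop with two up-front first-index searches (first upper-able char, first lower-able char excluding that index) followed by a single positional rebuild.
import Mathlib
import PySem

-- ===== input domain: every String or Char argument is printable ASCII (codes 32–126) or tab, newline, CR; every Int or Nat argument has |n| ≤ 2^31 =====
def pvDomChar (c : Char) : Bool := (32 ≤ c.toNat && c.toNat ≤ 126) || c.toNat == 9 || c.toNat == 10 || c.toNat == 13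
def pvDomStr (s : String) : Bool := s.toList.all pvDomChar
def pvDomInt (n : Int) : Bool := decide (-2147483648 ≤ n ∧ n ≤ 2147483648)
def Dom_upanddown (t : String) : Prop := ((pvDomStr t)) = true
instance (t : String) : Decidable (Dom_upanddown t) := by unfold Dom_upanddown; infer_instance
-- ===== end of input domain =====

-- B is a simpler decomposition (two first-index searches, then one rebuild); same return value, same cost.

-- ===== PORT A =====
-- A's for-loop over indices with the two flags, as structural recursion carrying the flags
def pvLoopA (toup todn : Bool) : List Char → List Char
  | [] => []
  | c :: cs =>
    if toup = false ∧ c ≠ PySem.Chars.upperChar c then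
      PySem.Chars.upperChar c :: pvLoopA true todn cs
    else if todn = false ∧ c ≠ PySem.Chars.lowerChar c then
      PySem.Chars.lowerChar c :: pvLoopA toup true cs
    else
      c :: pvLoopA toup todn cs

def upanddown (t : String) : String := String.mk (pvLoopA false false t.toList)

-- ===== PORT B =====
-- next((i for i,c in enumerate(t) if c != c.upper()), None)
def pvFindUp (i : Nat) : List Char → Option Nat
  | [] => none
  | c :: cs => if c ≠ PySem.Chars.upperChar c then some i else pvFindUp (i + 1) cs

-- next((i for i,c in enumerate(t) if c != c.lower() and i != up), None)
def pvFindDn (u : Option Nat) (i : Nat) : List Char → Option Nat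
  | [] => none
  | c :: cs => if c ≠ PySem.Chars.lowerChar c ∧ some i ≠ u then some i else pvFindDn u (i + 1) cs

-- ''.join(c.upper() if i == up else (c.lower() if i == dn else c) for i,c in enumerate(t))
def pvBuild (u d : Option Nat) (i : Nat) : List Char → List Char
  | [] => []
  | c :: cs =>
    (if some i = u then PySem.Chars.upperChar c
     else if some i = d then PySem.Chars.lowerChar c else c) :: pvBuild u d (i + 1) cs

def upanddown_alt (t : String) : String :=
  let cs := t.toList
  let u := pvFindUp 0 cs
  let d := pvFindDn u 0 cs
  String.mk (pvBuild u d 0 cs)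

-- ===== PRECONDITION & SPEC =====
def Spec_upanddown (t : String) (out : String) : Prop := out = upanddown_alt t
instance (t : String) (out : String) : Decidable (Spec_upanddown t out) := by unfold Spec_upanddown; infer_instance

-- ===== CLAIM (what is proved, stated in full; the proofs are below) =====
def Claim_equal_upanddown : Prop := ∀ (t : String), Dom_upanddown t → Spec_upanddown t (upanddown t)

-- ===== LEMMAS AND PROOFS =====

theorem pvFindUp_ge (cs : List Char) : ∀ (i j : Nat), pvFindUp i cs = some j → i ≤ j := by
  induction cs with
  | nil => intro i j h; simp [pvFindUp] at h
  | cons c cs ih =>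
    intro i j h
    simp only [pvFindUp] at h
    split at h
    · injection h with h; omega
    · exact Nat.le_of_succ_le (ih (i + 1) j h)

theorem pvFindDn_ge (u : Option Nat) (cs : List Char) :
    ∀ (i j : Nat), pvFindDn u i cs = some j → i ≤ j := by
  induction cs with
  | nil => intro i j h; simp [pvFindDn] at h
  | cons c cs ih =>
    intro i j h
    simp only [pvFindDn] at h
    split at h
    · injection h with h; omega
    · exact Nat.le_of_succ_le (ih (i + 1) j h)

theorem pv_main (cs : List Char) :
    ∀ (i : Nat) (toup todn : Bool) (u d : Option Nat),
      (∀ j, i ≤ j → (u = some j ↔ (toup = false ∧ pvFindUp i cs = some j))) →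
      (∀ j, i ≤ j → (d = some j ↔ (todn = false ∧ pvFindDn u i cs = some j))) →
      pvLoopA toup todn cs = pvBuild u d i cs := by
  induction cs with
  | nil => intro i toup todn u d _ _; simp [pvLoopA, pvBuild]
  | cons c cs ih =>
    intro i toup todn u d hu hd
    by_cases hup : toup = false ∧ c ≠ PySem.Chars.upperChar c
    · -- up branch fires
      have hfu : pvFindUp i (c :: cs) = some i := by simp [pvFindUp, hup.2]
      have hui : u = some i := (hu i (le_refl i)).2 ⟨hup.1, hfu⟩
      have hfd : pvFindDn u i (c :: cs) = pvFindDn u (i + 1) cs := by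
        simp [pvFindDn, hui]
      rw [pvLoopA, pvBuild, if_pos hup, if_pos hui.symm]
      congr 1
      apply ih (i + 1) true todn u d
      · intro j hj
        constructor
        · intro h; rw [hui] at h
          injection h with h; omega
        · rintro ⟨h, -⟩; exact absurd h (by simp)
      · intro j hj
        rw [hd j (by omega), hfd]
    · by_cases hdn : todn = false ∧ c ≠ PySem.Chars.lowerChar c
      · -- down branch fires; first need  u ≠ some i
        have huni : u ≠ some i := by
          intro h
          rcases (hu i (le_refl i)).1 h with ⟨ht, hf⟩
          simp only [pvFindUp] at hf
          split at hf
          · exact hup ⟨ht, by assumption⟩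
          · have := pvFindUp_ge cs (i + 1) i hf; omega
        have hfd : pvFindDn u i (c :: cs) = some i := by
          simp [pvFindDn, hdn.2, Ne.symm huni]
        have hdi : d = some i := (hd i (le_refl i)).2 ⟨hdn.1, hfd⟩
        rw [pvLoopA, pvBuild, if_neg hup, if_pos hdn,
            if_neg (fun h => huni h.symm), if_pos hdi.symm]
        congr 1
        apply ih (i + 1) toup true u d
        · intro j hj
          rw [hu j (by omega)]
          cases toup with
          | true => simp only [Bool.true_eq_false, false_and]
          | false =>
            have hc : c = PySem.Chars.upperChar c := by
              by_contra hc; exact hup ⟨rfl, hc⟩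
            rw [show pvFindUp i (c :: cs) = pvFindUp (i + 1) cs from by
              rw [pvFindUp, if_neg (not_not_intro hc)]]
        · intro j hj
          constructor
          · intro h; rw [hdi] at h
            injection h with h; omega
          · rintro ⟨h, -⟩; exact absurd h (by simp)
      · -- neither branch fires
        have huni : u ≠ some i := by
          intro h
          rcases (hu i (le_refl i)).1 h with ⟨ht, hf⟩
          simp only [pvFindUp] at hf
          split at hf
          · exact hup ⟨ht, by assumption⟩
          · have := pvFindUp_ge cs (i + 1) i hf; omega
        have hdni : d ≠ some i := by
          intro h
          rcases (hd i (le_refl i)).1 h with ⟨ht, hf⟩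
          simp only [pvFindDn] at hf
          split at hf
          · next hc => exact hdn ⟨ht, hc.1⟩
          · have := pvFindDn_ge u cs (i + 1) i hf; omega
        rw [pvLoopA, pvBuild, if_neg hup, if_neg hdn,
            if_neg (fun h => huni h.symm), if_neg (fun h => hdni h.symm)]
        congr 1
        apply ih (i + 1) toup todn u d
        · intro j hj
          rw [hu j (by omega)]
          cases toup with
          | true => simp only [Bool.true_eq_false, false_and]
          | false =>
            have hc : c = PySem.Chars.upperChar c := by
              by_contra hc; exact hup ⟨rfl, hc⟩
            rw [show pvFindUp i (c :: cs) = pvFindUp (i + 1) cs from by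
              rw [pvFindUp, if_neg (not_not_intro hc)]]
        · intro j hj
          rw [hd j (by omega)]
          cases todn with
          | true => simp only [Bool.true_eq_false, false_and]
          | false =>
            have hc : c = PySem.Chars.lowerChar c := by
              by_contra hc; exact hdn ⟨rfl, hc⟩
            rw [show pvFindDn u i (c :: cs) = pvFindDn u (i + 1) cs from by
              rw [pvFindDn, if_neg (fun h => h.1 hc)]]

-- ===== VERDICT (by name: the statement is the Claim_ definition above) =====
theorem upanddown_spec : Claim_equal_upanddown := by
  intro t _
  unfold Spec_upanddown upanddown upanddown_alt
  simp only []
  congr 1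
  exact pv_main t.toList 0 false false (pvFindUp 0 t.toList)
    (pvFindDn (pvFindUp 0 t.toList) 0 t.toList)
    (fun j _ => by simp) (fun j _ => by simp)
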